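-- pv_equiv track=rewrite | github.com/tempf2000/python | three consecutive one.py | accepts_three_consecutive_ones
-- ===== SOURCE A (Python) =====
-- def accepts_three_consecutive_ones(input_str):
--     current_state = 'q0'
--
--     for symbol in input_str:
--         if current_state == 'q0' and symbol == '1':
--             current_state = 'q1'
--         elif current_state == 'q1' and symbol == '1':
--             current_state = 'q2'
--         elif current_state == 'q2' and symbol == '1':
--             return True
--         else:
--             current_state = 'q0'
--
--     return False
-- ===== SOURCE B (Python) =====
-- def accepts_three_consecutive_ones(input_str):
--     return '111' in input_str
-- ===== Notes on version B (the rewrite author's own statement) =====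
-- stated objective: idiomatic
-- what changed: Replaces the hand-rolled three-state DFA scan with a single built-in substring containment test '111' in input_str.
import Mathlib
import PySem

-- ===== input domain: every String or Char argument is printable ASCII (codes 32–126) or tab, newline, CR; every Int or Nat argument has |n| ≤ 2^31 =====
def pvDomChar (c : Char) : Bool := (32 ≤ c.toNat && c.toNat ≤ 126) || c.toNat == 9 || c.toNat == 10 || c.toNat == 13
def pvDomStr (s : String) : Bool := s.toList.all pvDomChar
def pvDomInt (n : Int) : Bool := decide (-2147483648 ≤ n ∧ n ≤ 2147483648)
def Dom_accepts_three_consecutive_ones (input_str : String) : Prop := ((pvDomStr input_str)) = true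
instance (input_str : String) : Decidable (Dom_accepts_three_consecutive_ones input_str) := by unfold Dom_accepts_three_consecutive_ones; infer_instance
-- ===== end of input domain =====

-- B replaces A's hand-rolled three-state DFA scan with the idiomatic built-in substring test `'111' in input_str`.

-- ===== PORT A =====
-- the `for symbol in input_str` loop with early return, state kept as the literal strings 'q0'/'q1'/'q2'
def atcoLoop : List Char → String → Bool
  | [], _ => false
  | sym :: rest, st =>
    if st == "q0" && sym == '1' then atcoLoop rest "q1"
    else if st == "q1" && sym == '1' then atcoLoop rest "q2"
    else if st == "q2" && sym == '1' then true
    else atcoLoop rest "q0"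

def accepts_three_consecutive_ones (input_str : String) : Bool :=
  atcoLoop input_str.toList "q0"

-- ===== PORT B =====
def accepts_three_consecutive_ones_alt (input_str : String) : Bool :=
  PySem.Str.isIn "111" input_str

-- ===== PRECONDITION & SPEC =====
def Spec_accepts_three_consecutive_ones (input_str : String) (out : Bool) : Prop := out = accepts_three_consecutive_ones_alt input_str
instance (input_str : String) (out : Bool) : Decidable (Spec_accepts_three_consecutive_ones input_str out) := by unfold Spec_accepts_three_consecutive_ones; infer_instance

-- ===== CLAIM (what is proved, stated in full; the proofs are below) =====
def Claim_equal_accepts_three_consecutive_ones : Prop := ∀ (input_str : String), Dom_accepts_three_consecutive_ones input_str → Spec_accepts_three_consecutive_ones input_str (accepts_three_consecutive_ones input_str)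

-- ===== LEMMAS AND PROOFS =====

-- DFA-state invariant: the three loop states correspond to how many '1's are pending
theorem atcoLoop_char (cs : List Char) :
    (atcoLoop cs "q0" = true ↔ ['1','1','1'] <:+: cs) ∧
    (atcoLoop cs "q1" = true ↔ (['1','1'] <+: cs ∨ ['1','1','1'] <:+: cs)) ∧
    (atcoLoop cs "q2" = true ↔ (['1'] <+: cs ∨ ['1','1','1'] <:+: cs)) := by
  induction cs with
  | nil => simp [atcoLoop]
  | cons c cs ih =>
    obtain ⟨h0, h1, h2⟩ := ih
    by_cases hc : c = '1'
    · subst hc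
      have e0 : atcoLoop ('1'::cs) "q0" = atcoLoop cs "q1" := rfl
      have e1 : atcoLoop ('1'::cs) "q1" = atcoLoop cs "q2" := rfl
      have e2 : atcoLoop ('1'::cs) "q2" = true := rfl
      have habs : ['1','1'] <+: cs → ['1'] <+: cs := by
        rintro ⟨t, rfl⟩; exact ⟨'1' :: t, rfl⟩
      refine ⟨?_, ?_, ?_⟩
      · rw [e0, h1]; simp [List.infix_cons_iff, List.cons_prefix_cons]
      · rw [e1, h2]
        simp only [List.infix_cons_iff, List.cons_prefix_cons, true_and]
        tauto
      · rw [e2]; simp [List.infix_cons_iff, List.cons_prefix_cons]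
    · have hne : ∀ (l : List Char), ¬ ('1' :: l <+: c :: cs) := by
        intro l h
        rw [List.cons_prefix_cons] at h
        exact hc h.1.symm
      refine ⟨?_, ?_, ?_⟩ <;>
        simp [atcoLoop, hc, List.infix_cons_iff, hne, h0]
theorem accepts_three_consecutive_ones_spec : Claim_equal_accepts_three_consecutive_ones := by
  intro s _
  unfold Spec_accepts_three_consecutive_ones accepts_three_consecutive_ones accepts_three_consecutive_ones_alt
  rw [Bool.eq_iff_iff, (atcoLoop_char s.toList).1, PySem.Str.isIn_iff_infix]
  rfl
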